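-- pv_equiv track=rewrite | github.com/John-Yang666/fntl | backend/myapp/tasks/topology_processing.py | get_direction_line_status
-- ===== SOURCE A (Python) =====
-- def get_direction_line_status(alarms_of_this_device, direction):
--     if direction == 1:
--         a_channel_failure = any(alarm_code in {162, 252} for alarm_code, alarm_status in alarms_of_this_device.items() if alarm_status['bit_value'] == 1)
--         b_channel_failure = any(alarm_code in {164, 254} for alarm_code, alarm_status in alarms_of_this_device.items() if alarm_status['bit_value'] == 1)
--         cable_failure = any(alarm_code == 71 for alarm_code, alarm_status in alarms_of_this_device.items() if alarm_status['bit_value'] == 1)  # 使用告警码71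
--
--         if a_channel_failure and b_channel_failure and cable_failure:
--             return 'bad'
--         elif not a_channel_failure and not b_channel_failure and not cable_failure:
--             return 'good'
--         else:
--             return 'blink'
--     elif direction == 2:
--         a_channel_failure = any(alarm_code in {342, 432} for alarm_code, alarm_status in alarms_of_this_device.items() if alarm_status['bit_value'] == 1)
--         b_channel_failure = any(alarm_code in {344, 434} for alarm_code, alarm_status in alarms_of_this_device.items() if alarm_status['bit_value'] == 1)
--         cable_failure = any(alarm_code == 111 for alarm_code, alarm_status in alarms_of_this_device.items() if alarm_status['bit_value'] == 1)  # 使用告警码111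
--
--         if a_channel_failure and b_channel_failure and cable_failure:
--             return 'bad'
--         elif not a_channel_failure and not b_channel_failure and not cable_failure:
--             return 'good'
--         else:
--             return 'blink'
--     return 'null'
-- ===== SOURCE B (Python) =====
-- _CATEGORIES = {
--     1: [{162, 252}, {164, 254}, {71}],
--     2: [{342, 432}, {344, 434}, {111}],
-- }
--
--
-- def get_direction_line_status(alarms_of_this_device, direction):
--     cats = _CATEGORIES.get(direction)
--     if cats is None:
--         return 'null'
--     active = {code for code, status in alarms_of_this_device.items()
--               if status.get('bit_value') == 1}
--     hits = sum(1 for cat in cats if cat & active)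
--     return {0: 'good', len(cats): 'bad'}.get(hits, 'blink')
-- ===== Notes on version B (the rewrite author's own statement) =====
-- stated objective: simpler
-- what changed: Replaces A's two duplicated per-direction branches of three filtered any()-scans plus boolean case logic by a direction-keyed table of code-category sets, a single pass building the set of active alarm codes, and a count-of-failed-categories verdict lookup; B reads bit_value with .get so it treats a missing key as inactive and returns where A raises KeyError.
import Mathlib
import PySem

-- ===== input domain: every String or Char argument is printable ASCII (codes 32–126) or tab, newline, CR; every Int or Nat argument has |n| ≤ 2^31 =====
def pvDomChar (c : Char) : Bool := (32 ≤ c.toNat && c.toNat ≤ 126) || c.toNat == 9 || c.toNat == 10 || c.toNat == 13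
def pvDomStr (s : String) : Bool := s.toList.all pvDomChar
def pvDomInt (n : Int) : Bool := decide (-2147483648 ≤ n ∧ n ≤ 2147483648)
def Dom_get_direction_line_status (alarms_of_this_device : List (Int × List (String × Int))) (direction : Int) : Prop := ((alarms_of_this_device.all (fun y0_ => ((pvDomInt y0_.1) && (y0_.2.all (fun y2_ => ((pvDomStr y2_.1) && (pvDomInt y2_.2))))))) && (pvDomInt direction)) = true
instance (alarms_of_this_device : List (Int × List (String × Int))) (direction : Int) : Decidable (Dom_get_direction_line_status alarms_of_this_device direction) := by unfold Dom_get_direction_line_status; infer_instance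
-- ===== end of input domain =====

-- B replaces A's two duplicated per-direction branches of three filtered any()-scans and boolean
-- case logic by a direction-keyed table of code categories, one pass building the active-code set,
-- and a count-of-failed-categories verdict lookup (objective: simpler).

-- ===== PORT A =====
-- The outer argument and each alarm-status value are Python dicts: both are read through
-- PySem.Dict.ofList (insertion order, last value wins for a duplicate key). Python's
-- alarm_status['bit_value'] raises KeyError on a missing key; the port totalises it with getD 0
-- (0 ≠ 1, so a missing key acts as 'not active'); Pre_ below admits exactly the inputs where the
-- Python A returns normally.
def pvBitA (p : Int × List (String × Int)) : Bool :=
  ((PySem.Dict.ofList p.2).get? "bit_value").getD 0 == 1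

def get_direction_line_status (alarms_of_this_device : List (Int × List (String × Int))) (direction : Int) : String :=
  let items := (PySem.Dict.ofList alarms_of_this_device).items
  if direction == 1 then
    let ach := items.any (fun p => pvBitA p && (p.1 == 162 || p.1 == 252))
    let bch := items.any (fun p => pvBitA p && (p.1 == 164 || p.1 == 254))
    let cab := items.any (fun p => pvBitA p && p.1 == 71)
    if ach && bch && cab then "bad"
    else if !ach && !bch && !cab then "good"
    else "blink"
  else if direction == 2 then
    let ach := items.any (fun p => pvBitA p && (p.1 == 342 || p.1 == 432))
    let bch := items.any (fun p => pvBitA p && (p.1 == 344 || p.1 == 434))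
    let cab := items.any (fun p => pvBitA p && p.1 == 111)
    if ach && bch && cab then "bad"
    else if !ach && !bch && !cab then "good"
    else "blink"
  else "null"

-- ===== PORT B =====
-- the _CATEGORIES module constant of Source B
def pvCategories : PySem.Dict Int (List (PySem.Set Int)) :=
  PySem.Dict.ofList
    [(1, [PySem.Set.ofList [162, 252], PySem.Set.ofList [164, 254], PySem.Set.ofList [71]]),
     (2, [PySem.Set.ofList [342, 432], PySem.Set.ofList [344, 434], PySem.Set.ofList [111]])]

-- status.get('bit_value') == 1
def pvBitB (p : Int × List (String × Int)) : Bool :=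
  (PySem.Dict.ofList p.2).get? "bit_value" == some 1

def get_direction_line_status_alt (alarms_of_this_device : List (Int × List (String × Int))) (direction : Int) : String :=
  match pvCategories.get? direction with
  | none => "null"
  | some cats =>
    let active : PySem.Set Int :=
      PySem.Set.ofList (((PySem.Dict.ofList alarms_of_this_device).items.filter pvBitB).map Prod.fst)
    let hits : Int := (cats.map (fun cat => if (PySem.Set.inter cat active).isEmpty then 0 else 1)).sum
    (PySem.Dict.ofList [((0 : Int), "good"), ((cats.length : Int), "bad")]).getD hits "blink"

-- ===== PRECONDITION & SPEC =====
-- is the 'bit_value' key present in this alarm-status dict?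
def pvWF (p : Int × List (String × Int)) : Bool :=
  ((PySem.Dict.ofList p.2).get? "bit_value").isSome
-- does l hold an entry with bit_value 1 whose code is in cs?
def pvHasMatch (l : List (Int × List (String × Int))) (cs : List Int) : Bool :=
  l.any (fun p => pvBitB p && cs.contains p.1)
-- Pre_ admits exactly the inputs where Python A RETURNS, and excludes exactly those where it
-- raises KeyError: for direction 1 or 2, either every alarm status has the 'bit_value' key, or —
-- thanks to any()'s short-circuiting — all three code categories are matched by active alarms
-- strictly before the first status lacking the key (then A returns 'bad' without reaching it).
def Pre_get_direction_line_status (alarms_of_this_device : List (Int × List (String × Int))) (direction : Int) : Prop :=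
  (direction = 1 ∨ direction = 2) →
    (let items := (PySem.Dict.ofList alarms_of_this_device).items
     items.all pvWF = true ∨
     (let pre := items.takeWhile pvWF
      let cs : List Int × List Int × List Int :=
        if direction = 1 then ([162, 252], [164, 254], [71]) else ([342, 432], [344, 434], [111])
      (pvHasMatch pre cs.1 && pvHasMatch pre cs.2.1 && pvHasMatch pre cs.2.2) = true))
instance (alarms_of_this_device : List (Int × List (String × Int))) (direction : Int) : Decidable (Pre_get_direction_line_status alarms_of_this_device direction) := by unfold Pre_get_direction_line_status; infer_instance
def pvWitness_get_direction_line_status : (List (Int × List (String × Int))) × Int :=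
  ([(162, [("bit_value", 1)]), (71, [("bit_value", 0)])], 1)

def Spec_get_direction_line_status (alarms_of_this_device : List (Int × List (String × Int))) (direction : Int) (out : String) : Prop := out = get_direction_line_status_alt alarms_of_this_device direction
instance (alarms_of_this_device : List (Int × List (String × Int))) (direction : Int) (out : String) : Decidable (Spec_get_direction_line_status alarms_of_this_device direction out) := by unfold Spec_get_direction_line_status; infer_instance

-- ===== CLAIM (what is proved, stated in full; the proofs are below) =====
def Claim_equal_get_direction_line_status : Prop := ∀ (alarms_of_this_device : List (Int × List (String × Int))) (direction : Int), Dom_get_direction_line_status alarms_of_this_device direction → Pre_get_direction_line_status alarms_of_this_device direction → Spec_get_direction_line_status alarms_of_this_device direction (get_direction_line_status alarms_of_this_device direction)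

-- ===== LEMMAS AND PROOFS =====

-- A's truth test equals B's: getD 0 == 1 iff get? == some 1 (a missing key is never active).
lemma pvBitA_eq_pvBitB (p : Int × List (String × Int)) : pvBitA p = pvBitB p := by
  unfold pvBitA pvBitB
  cases (PySem.Dict.ofList p.2).get? "bit_value" <;> simp

-- B's emptiness test of (category ∩ active-code set) equals A's filtered any()-scan.
lemma inter_active (l : List (Int × List (String × Int))) (cs : List Int) :
    (PySem.Set.inter (PySem.Set.ofList cs) (PySem.Set.ofList ((l.filter pvBitB).map Prod.fst))).isEmpty
      = !(l.any fun p => pvBitB p && cs.contains p.1) := by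
  have hmem : ∀ x : Int, x ∈ PySem.Set.inter (PySem.Set.ofList cs) (PySem.Set.ofList ((l.filter pvBitB).map Prod.fst)) ↔ (x ∈ cs ∧ ∃ p ∈ l, pvBitB p = true ∧ p.1 = x) := by
    intro x
    simp [PySem.Set.mem_inter, PySem.Set.mem_ofList, List.mem_filter, List.mem_map]
  cases hany : (l.any fun p => pvBitB p && cs.contains p.1) with
  | false =>
      simp only [Bool.not_false]
      rw [List.isEmpty_iff, List.eq_nil_iff_forall_not_mem]
      intro x hx
      rw [hmem x] at hx
      obtain ⟨hcs, p, hp, hbit, rfl⟩ := hx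
      have := List.any_eq_false.mp hany p hp
      simp [hbit] at this
      exact this hcs
  | true =>
      simp only [Bool.not_true]
      obtain ⟨p, hp, hpred⟩ := List.any_eq_true.mp hany
      rw [Bool.and_eq_true] at hpred
      have hx : p.1 ∈ PySem.Set.inter (PySem.Set.ofList cs) (PySem.Set.ofList ((l.filter pvBitB).map Prod.fst)) := by
        rw [hmem]
        exact ⟨by simpa using hpred.2, p, hp, hpred.1, rfl⟩
      cases hE : (PySem.Set.inter (PySem.Set.ofList cs) (PySem.Set.ofList ((l.filter pvBitB).map Prod.fst))) with
      | nil => rw [hE] at hx; cases hx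
      | cons y t => rfl

-- ===== VERDICT (by name: the statement is the Claim_ definition above) =====
theorem get_direction_line_status_spec : Claim_equal_get_direction_line_status := by
  intro a direction _ _
  unfold Spec_get_direction_line_status
  by_cases h1 : direction = 1
  · subst h1
    have hc : pvCategories.get? (1 : Int) = some [PySem.Set.ofList [162, 252], PySem.Set.ofList [164, 254], PySem.Set.ofList [71]] := by decide
    unfold get_direction_line_status get_direction_line_status_alt
    simp only [hc, pvBitA_eq_pvBitB, List.map_cons, List.map_nil, List.sum_cons, List.sum_nil, inter_active]
    simp only [List.contains_cons, List.contains_nil, Bool.or_false, beq_iff_eq]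
    generalize ((PySem.Dict.ofList a).items.any fun p => pvBitB p && (p.1 == 162 || p.1 == 252)) = f1
    generalize ((PySem.Dict.ofList a).items.any fun p => pvBitB p && (p.1 == 164 || p.1 == 254)) = f2
    generalize ((PySem.Dict.ofList a).items.any fun p => pvBitB p && (p.1 == 71)) = f3
    cases f1 <;> cases f2 <;> cases f3 <;> simp <;> decide
  · by_cases h2 : direction = 2
    · subst h2
      have hc : pvCategories.get? (2 : Int) = some [PySem.Set.ofList [342, 432], PySem.Set.ofList [344, 434], PySem.Set.ofList [111]] := by decide
      unfold get_direction_line_status get_direction_line_status_alt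
      simp only [hc, pvBitA_eq_pvBitB, List.map_cons, List.map_nil, List.sum_cons, List.sum_nil, inter_active]
      simp only [List.contains_cons, List.contains_nil, Bool.or_false, beq_iff_eq]
      generalize ((PySem.Dict.ofList a).items.any fun p => pvBitB p && (p.1 == 342 || p.1 == 432)) = f1
      generalize ((PySem.Dict.ofList a).items.any fun p => pvBitB p && (p.1 == 344 || p.1 == 434)) = f2
      generalize ((PySem.Dict.ofList a).items.any fun p => pvBitB p && (p.1 == 111)) = f3
      cases f1 <;> cases f2 <;> cases f3 <;> simp <;> decide
    · have hmk : pvCategories = PySem.Dict.mk [(1, [PySem.Set.ofList [162, 252], PySem.Set.ofList [164, 254], PySem.Set.ofList [71]]), (2, [PySem.Set.ofList [342, 432], PySem.Set.ofList [344, 434], PySem.Set.ofList [111]])] := by decide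
      have hc : pvCategories.get? direction = none := by
        rw [hmk, PySem.Dict.get?_mk_cons, PySem.Dict.get?_mk_cons]
        simp [Ne.symm h1, Ne.symm h2, PySem.Dict.get?]
      unfold get_direction_line_status get_direction_line_status_alt
      simp [hc, h1, h2]
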